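-- pv_equiv track=rewrite | github.com/NTKhang2002/P-O3ESATMeetingOwl | Joren1.py | mostcentralface
-- ===== SOURCE A (Python) =====
-- def mostcentralface(width,faces):
--     if faces != ():
--         centerpoint = int(width/2)
--         xlijst = list()
--         for face in range(len(faces)):
--             xlijst.append(int(abs(centerpoint - faces[face][0])))
--         return xlijst.index(min(xlijst))
--     return 0
-- ===== SOURCE B (Python) =====
-- def mostcentralface(width, faces):
--     centerpoint = int(width / 2)
--     best_idx = 0
--     best = None
--     for i, face in enumerate(faces):
--         d = abs(centerpoint - face[0])
--         if best is None or d < best: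
--             best = d
--             best_idx = i
--     return best_idx
-- ===== Notes on version B (the rewrite author's own statement) =====
-- stated objective: simpler
-- what changed: B replaces A's three passes (build a distance list, min() over it, list.index over it) by one single pass that tracks the best index and smallest distance with a strict-< update so the first minimum wins ties.
import Mathlib
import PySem

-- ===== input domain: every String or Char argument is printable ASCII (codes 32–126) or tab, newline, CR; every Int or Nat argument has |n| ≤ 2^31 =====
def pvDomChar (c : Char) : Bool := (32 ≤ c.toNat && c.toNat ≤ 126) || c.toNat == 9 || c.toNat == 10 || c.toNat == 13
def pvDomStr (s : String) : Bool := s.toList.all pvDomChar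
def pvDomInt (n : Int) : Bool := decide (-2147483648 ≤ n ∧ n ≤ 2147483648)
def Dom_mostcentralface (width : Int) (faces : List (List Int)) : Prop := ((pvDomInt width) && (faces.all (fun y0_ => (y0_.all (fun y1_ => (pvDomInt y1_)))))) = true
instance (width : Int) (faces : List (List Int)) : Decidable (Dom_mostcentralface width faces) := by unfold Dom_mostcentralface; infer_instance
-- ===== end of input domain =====

-- B: one single pass tracking (best index, smallest distance) instead of A's three passes
-- (build distance list, min, index); return-value equivalence on faces whose rows are nonempty.

-- ===== PORT A =====
def mostcentralface (width : Int) (faces : List (List Int)) : Int :=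
  if faces ≠ [] then   -- 'faces != ()' (the argument is a tuple of tuples)
    let centerpoint := PySem.Int.truncdiv width 2
    let xlijst := (PySem.List.pyRange 0 (faces.length : Int) 1).foldl
        (fun acc i => acc ++ [|centerpoint - PySem.List.pyGetD (PySem.List.pyGetD faces i []) 0 0|]) []
    match PySem.List.min? xlijst (fun y => y) with
    | some m => ((PySem.List.index? xlijst m).getD 0 : Nat)
    | none => 0   -- unreachable: xlijst has one entry per face and faces ≠ []
  else 0

-- ===== PORT B =====
def mostcentralface_alt (width : Int) (faces : List (List Int)) : Int :=
  let centerpoint := PySem.Int.truncdiv width 2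
  let st := (PySem.List.enumerate faces 0).foldl
      (fun (st : Int × Option Int) p =>
        let d := |centerpoint - PySem.List.pyGetD p.2 0 0|
        match st.2 with
        | none => (p.1, some d)
        | some b => if d < b then (p.1, some d) else st)
      ((0 : Int), (none : Option Int))
  st.1

-- ===== PRECONDITION & SPEC =====
-- Pre_ excludes exactly the inputs where Python A raises: any empty row
-- (faces[face][0] is an IndexError).
def Pre_mostcentralface (width : Int) (faces : List (List Int)) : Prop :=
  ∀ face ∈ faces, face ≠ []
instance (width : Int) (faces : List (List Int)) : Decidable (Pre_mostcentralface width faces) := by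
  unfold Pre_mostcentralface; infer_instance
def pvWitness_mostcentralface : Int × List (List Int) := (10, [[3, 1], [7]])

def Spec_mostcentralface (width : Int) (faces : List (List Int)) (out : Int) : Prop := out = mostcentralface_alt width faces
instance (width : Int) (faces : List (List Int)) (out : Int) : Decidable (Spec_mostcentralface width faces out) := by unfold Spec_mostcentralface; infer_instance

-- ===== CLAIM (what is proved, stated in full; the proofs are below) =====
def Claim_equal_mostcentralface : Prop := ∀ (width : Int) (faces : List (List Int)), Dom_mostcentralface width faces → Pre_mostcentralface width faces → Spec_mostcentralface width faces (mostcentralface width faces)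

-- ===== LEMMAS AND PROOFS =====

-- every nonempty list has a Python min
theorem pvMin?_isSome (xs : List Int) (h : xs ≠ []) :
    ∃ m, PySem.List.min? xs (fun y => y) = some m := by
  cases hm : PySem.List.min? xs (fun y => y) with
  | none => exact absurd ((PySem.List.min?_eq_none_iff xs (fun y => y)).mp hm) h
  | some m => exact ⟨m, rfl⟩

-- B's loop body, abstracted over the distance function applied to a row
def pvStep (f : List Int → Int) (st : Int × Option Int) (p : Int × List Int) : Int × Option Int :=
  match st.2 with
  | none => (p.1, some (f p.2))
  | some b => if f p.2 < b then (p.1, some (f p.2)) else st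

-- Invariant of B's single pass: it ends in (first index of the minimum, some minimum)
theorem pvFold_argmin (f : List Int → Int) :
    ∀ (faces : List (List Int)), faces ≠ [] →
    ∃ (m : Int) (k : Nat),
      PySem.List.min? (faces.map f) (fun y => y) = some m ∧
      PySem.List.index? (faces.map f) m = some k ∧
      (PySem.List.enumerate faces 0).foldl (pvStep f) ((0 : Int), (none : Option Int)) = ((k : Int), some m) := by
  intro faces
  induction faces using List.reverseRecOn with
  | nil => intro h; exact absurd rfl h
  | append_singleton l a ih =>
    intro _
    rcases eq_or_ne l [] with rfl | hl
    · refine ⟨f a, 0, ?_, ?_, ?_⟩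
      · simp [PySem.List.min?]
      · simp
      · simp [PySem.List.enumerate, pvStep]
    · obtain ⟨m, k, hmin, hidx, hfold⟩ := ih hl
      have hmem : m ∈ l.map f := PySem.List.min?_mem hmin
      have hle : ∀ y ∈ l.map f, m ≤ y := fun y hy => PySem.List.min?_isMin hmin y hy
      have hidxk : k < (l.map f).length := by
        obtain ⟨hk, -, -⟩ := PySem.List.getElem_of_index?_eq_some hidx
        exact hk
      have henum : PySem.List.enumerate (l ++ [a]) 0
          = PySem.List.enumerate l 0 ++ [((l.length : Int), a)] := by
        rw [PySem.List.enumerate_append]; simp [PySem.List.enumerate]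
      have hfold' : List.foldl (pvStep f) ((0:Int), none) (PySem.List.enumerate (l ++ [a]) 0)
          = pvStep f ((k : Int), some m) ((l.length : Int), a) := by
        rw [henum, List.foldl_append, hfold]; simp
      have hmap : (l ++ [a]).map f = l.map f ++ [f a] := by simp
      by_cases hlt : f a < m
      · refine ⟨f a, l.length, ?_, ?_, ?_⟩
        · -- f a is the unique minimum of the extended list
          obtain ⟨m', hm'⟩ := pvMin?_isSome ((l ++ [a]).map f) (by simp)
          have hm'mem := PySem.List.min?_mem hm'
          have hm'le : ∀ y ∈ (l ++ [a]).map f, m' ≤ y := fun y hy => PySem.List.min?_isMin hm' y hy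
          have h1 : m' ≤ f a := hm'le _ (by simp [hmap])
          have h2 : f a ≤ m' := by
            rw [hmap] at hm'mem
            rcases List.mem_append.mp hm'mem with h | h
            · exact le_of_lt (lt_of_lt_of_le hlt (hle _ h))
            · simp at h; omega
          rw [hm', le_antisymm h1 h2]
        · rw [hmap]
          have hnot : f a ∉ l.map f := fun hmem' => absurd (hle _ hmem') (by omega)
          rw [PySem.List.index?_append_singleton_self (l.map f) (f a) hnot]
          simp
        · rw [hfold', pvStep]; simp [hlt]
      · refine ⟨m, k, ?_, ?_, ?_⟩
        · obtain ⟨m', hm'⟩ := pvMin?_isSome ((l ++ [a]).map f) (by simp)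
          have hm'mem := PySem.List.min?_mem hm'
          have hm'le : ∀ y ∈ (l ++ [a]).map f, m' ≤ y := fun y hy => PySem.List.min?_isMin hm' y hy
          have h1 : m' ≤ m := hm'le _ (by rw [hmap]; exact List.mem_append_left _ hmem)
          have h2 : m ≤ m' := by
            rw [hmap] at hm'mem
            rcases List.mem_append.mp hm'mem with h | h
            · exact hle _ h
            · simp at h; omega
          rw [hm', le_antisymm h1 h2]
        · rw [hmap, PySem.List.index?_append_of_mem _ hmem, hidx]
        · rw [hfold', pvStep]; simp [hlt]

-- A's list-building loop over range(len(faces)) builds exactly map f faces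
theorem pvXlijst_eq_map (faces : List (List Int)) (c : Int) :
    (PySem.List.pyRange 0 (faces.length : Int) 1).foldl
      (fun acc i => acc ++ [|c - PySem.List.pyGetD (PySem.List.pyGetD faces i []) 0 0|]) []
    = faces.map (fun face => |c - PySem.List.pyGetD face 0 0|) := by
  rw [PySem.List.foldl_pyRange_zero_pyGetD' faces ([] : List Int)
      (fun acc face => acc ++ [|c - PySem.List.pyGetD face 0 0|]) []]
  rw [PySem.List.foldl_append_singleton_eq_map]
  simp

-- ===== VERDICT (by name: the statement is the Claim_ definition above) =====
theorem mostcentralface_spec : Claim_equal_mostcentralface := by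
  intro width faces _ _
  rcases eq_or_ne faces [] with rfl | hne
  · simp [Spec_mostcentralface, mostcentralface, mostcentralface_alt, PySem.List.enumerate]
  unfold Spec_mostcentralface mostcentralface mostcentralface_alt
  rw [if_pos hne]
  obtain ⟨m, k, hmin, hidx, hfold⟩ :=
    pvFold_argmin (fun face => |PySem.Int.truncdiv width 2 - PySem.List.pyGetD face 0 0|) faces hne
  have hB : (PySem.List.enumerate faces 0).foldl
      (fun (st : Int × Option Int) p =>
        let d := |PySem.Int.truncdiv width 2 - PySem.List.pyGetD p.2 0 0|
        match st.2 with
        | none => (p.1, some d)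
        | some b => if d < b then (p.1, some d) else st)
      ((0 : Int), (none : Option Int)) = ((k : Int), some m) := hfold
  simp only [pvXlijst_eq_map, hB, hmin, hidx]
  simp
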